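-- pv_equiv track=rewrite | github.com/shutpa01/cryptic_solver_v2 | classifier/align_fodder.py | _align_acrostic
-- ===== SOURCE A (Python) =====
-- def _align_acrostic(yields, available, tokens, consumed):
--     """Find contiguous clue words whose initials spell yields."""
--     if not yields:
--         return None
--
--     target = yields.lower()
--     avail_indices = sorted(i for i, _, _ in available)
--
--     for start in range(len(tokens)):
--         end = start + len(target)
--         if end > len(tokens):
--             break
--         indices = set(range(start, end))
--         if not indices - consumed:
--             continue
--         initials = "".join(tokens[j][1][0] if tokens[j][1] else "" for j in range(start, end))
--         if initials == target:
--             raw_span = " ".join(tokens[j][0] for j in range(start, end))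
--             return raw_span, "acrostic_scan"
--
--     return None
-- ===== SOURCE B (Python) =====
-- def _align_acrostic(yields, available, tokens, consumed):
--     """Find contiguous clue words whose initials spell yields.
--
--     Builds the initials text once ('\x00' marks tokens with an empty lemma,
--     which can never match) and lets str.find do the substring search,
--     restarting past matches whose whole window is already consumed.
--     """
--     if not yields:
--         return None
--     target = yields.lower()
--     m = len(target)
--     text = "".join(t[1][0] if t[1] else "\x00" for t in tokens)
--     pos = 0
--     while True:
--         start = text.find(target, pos)
--         if start == -1:
--             return None
--         if any(j not in consumed for j in range(start, start + m)):
--             return " ".join(t[0] for t in tokens[start:start + m]), "acrostic_scan"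
--         pos = start + 1
-- ===== Notes on version B (the rewrite author's own statement) =====
-- stated objective: alternative
-- what changed: Instead of rebuilding the index set, the initials string and the span for every window, B builds the per-token initials text once and uses str.find (restarting after fully-consumed matches) to locate the first matching non-consumed window.
import Mathlib
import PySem

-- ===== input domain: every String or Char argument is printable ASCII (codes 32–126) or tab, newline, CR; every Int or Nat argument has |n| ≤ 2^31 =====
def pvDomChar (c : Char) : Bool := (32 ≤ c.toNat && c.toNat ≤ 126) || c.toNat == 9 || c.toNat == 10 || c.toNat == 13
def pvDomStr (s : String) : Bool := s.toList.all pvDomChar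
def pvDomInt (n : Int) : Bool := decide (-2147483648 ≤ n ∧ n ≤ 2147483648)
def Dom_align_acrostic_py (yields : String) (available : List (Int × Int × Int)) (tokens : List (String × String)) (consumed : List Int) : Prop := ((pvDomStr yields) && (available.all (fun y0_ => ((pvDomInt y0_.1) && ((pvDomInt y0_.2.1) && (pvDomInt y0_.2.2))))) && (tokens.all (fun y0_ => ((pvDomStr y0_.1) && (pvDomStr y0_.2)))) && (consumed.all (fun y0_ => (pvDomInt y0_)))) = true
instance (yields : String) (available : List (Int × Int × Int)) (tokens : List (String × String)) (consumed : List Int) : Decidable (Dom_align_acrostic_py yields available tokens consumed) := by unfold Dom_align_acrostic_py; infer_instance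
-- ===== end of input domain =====

-- B builds the initials text once and locates matches with the library substring
-- search (restarting past fully-consumed windows), instead of A's per-window
-- set/string rebuilds (an alternative decomposition of the same scan).

-- ===== PORT A =====
-- tokens[j][1][0] if tokens[j][1] else "" (as a char list)
def initialOf (t : String × String) : List Char :=
  match t.2.toList with | [] => [] | c :: _ => [c]

-- the for-loop over `start` (with its `break` on end > len(tokens))
def aLoop (target : List Char) (tokens : List (String × String)) (consumed : List Int) (start : Nat) : Option (String × String) :=
  if h : start < tokens.length then
    if tokens.length < start + target.length then none   -- break
    else
      -- indices = set(range(start, end)); if not indices - consumed: continue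
      if PySem.Set.diff (PySem.Set.ofList (PySem.List.pyRange (start : Int) ((start + target.length : Nat) : Int) 1)) consumed = [] then
        aLoop target tokens consumed (start + 1)
      else
        -- initials = "".join(tokens[j][1][0] if tokens[j][1] else "" ...)
        let initials : List Char :=
          (PySem.List.pyRange (start : Int) ((start + target.length : Nat) : Int) 1).flatMap
            (fun j => initialOf (PySem.List.pyGetD tokens j ("", "")))
        if initials = target then
          some (PySem.Str.join " " ((PySem.List.pyRange (start : Int) ((start + target.length : Nat) : Int) 1).map
                  (fun j => (PySem.List.pyGetD tokens j ("", "")).1)), "acrostic_scan")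
        else aLoop target tokens consumed (start + 1)
  else none
termination_by tokens.length - start

def align_acrostic_py (yields : String) (available : List (Int × Int × Int)) (tokens : List (String × String)) (consumed : List Int) : Option (String × String) :=
  if yields.toList = [] then none
  else
    let target := PySem.Str.lower yields
    let _avail_indices := PySem.List.sorted (available.map (fun t => t.1)) (fun x => x) false
    aLoop target.toList tokens consumed 0

-- ===== PORT B =====
-- t[1][0] if t[1] else "\x00"
def initialChar (t : String × String) : Char :=
  match t.2.toList with | [] => Char.ofNat 0 | c :: _ => c

-- text = "".join(t[1][0] if t[1] else "\x00" for t in tokens)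
def bText (tokens : List (String × String)) : List Char :=
  tokens.map initialChar

-- the while-True loop: find next match from pos, accept unless fully consumed
def bLoop (target text : List Char) (tokens : List (String × String)) (consumed : List Int) (pos fuel : Nat) : Option (String × String) :=
  match fuel with
  | 0 => none
  | fuel + 1 =>
    let s := PySem.Chars.findFrom text target (pos : Int) none
    if s = -1 then none
    else
      let start := s.toNat
      if (PySem.List.pyRange (start : Int) ((start + target.length : Nat) : Int) 1).any
           (fun j => !(consumed.contains j)) then
        some (PySem.Str.join " " (((tokens.drop start).take target.length).map (fun t => t.1)), "acrostic_scan")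
      else bLoop target text tokens consumed (start + 1) fuel

def align_acrostic_py_alt (yields : String) (available : List (Int × Int × Int)) (tokens : List (String × String)) (consumed : List Int) : Option (String × String) :=
  if yields.toList = [] then none
  else
    let target := (PySem.Str.lower yields).toList
    bLoop target (bText tokens) tokens consumed 0 (tokens.length + 1)

-- ===== PRECONDITION & SPEC =====
def Spec_align_acrostic_py (yields : String) (available : List (Int × Int × Int)) (tokens : List (String × String)) (consumed : List Int) (out : Option (String × String)) : Prop := out = align_acrostic_py_alt yields available tokens consumed
instance (yields : String) (available : List (Int × Int × Int)) (tokens : List (String × String)) (consumed : List Int) (out : Option (String × String)) : Decidable (Spec_align_acrostic_py yields available tokens consumed out) := by unfold Spec_align_acrostic_py; infer_instance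

-- ===== CLAIM (what is proved, stated in full; the proofs are below) =====
def Claim_equal_align_acrostic_py : Prop := ∀ (yields : String) (available : List (Int × Int × Int)) (tokens : List (String × String)) (consumed : List Int), Dom_align_acrostic_py yields available tokens consumed → Spec_align_acrostic_py yields available tokens consumed (align_acrostic_py yields available tokens consumed)

-- ===== LEMMAS AND PROOFS =====

-- the not-fully-consumed test, shared shape of both ports' conditions
def okB (consumed : List Int) (start m : Nat) : Bool :=
  (PySem.List.pyRange (start : Int) ((start + m : Nat) : Int) 1).any (fun j => !(consumed.contains j))

-- reference loop: scan starts one by one, return first matching non-consumed window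
def refLoop (target : List Char) (tokens : List (String × String)) (consumed : List Int) (start : Nat) : Option (String × String) :=
  if h : start + target.length ≤ tokens.length then
    if target.isPrefixOf ((bText tokens).drop start) && okB consumed start target.length then
      some (PySem.Str.join " " (((tokens.drop start).take target.length).map (fun t => t.1)), "acrostic_scan")
    else refLoop target tokens consumed (start + 1)
  else none
termination_by tokens.length + 1 - start
decreasing_by omega

theorem length_bText (tokens : List (String × String)) : (bText tokens).length = tokens.length := by
  simp [bText]

theorem pyRange_map_getD {α : Type} (tokens : List (String × String)) (f : (String × String) → α)
    (start m : Nat) (h : start + m ≤ tokens.length) :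
    (PySem.List.pyRange (start : Int) ((start + m : Nat) : Int) 1).map
        (fun j => f (PySem.List.pyGetD tokens j ("", ""))) =
      ((tokens.drop start).take m).map f := by
  have hb : ((((start + m : Nat) : Int)) - (start : Int)).toNat = m := by omega
  rw [PySem.List.pyRange_one, hb, List.map_map]
  apply List.ext_getElem
  · simp; omega
  · intro i h1 h2
    have hi : i < m := by simpa using h1
    have hsi : start + i < tokens.length := by omega
    simp only [List.getElem_map, List.getElem_range, Function.comp_apply,
      List.getElem_take, List.getElem_drop]
    rw [PySem.List.pyGetD_eq_getElem tokens ("", "") (by omega) (by omega)]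
    congr 1

theorem flatMap_len_le (w : List (String × String))
    (g : (String × String) → List Char) (hg : ∀ t, (g t).length ≤ 1) :
    (w.flatMap g).length ≤ w.length := by
  induction w with
  | nil => simp
  | cons t w ih =>
    simp only [List.flatMap_cons, List.length_append, List.length_cons]
    have := hg t
    omega

-- windows containing an empty-lemma token match neither side; otherwise both compare the initials
theorem window_iff (w : List (String × String)) (tg : List Char)
    (hnul : Char.ofNat 0 ∉ tg) (hlen : w.length = tg.length) :
    (w.flatMap initialOf = tg ↔ w.map initialChar = tg) := by
  induction w generalizing tg with
  | nil =>
    cases tg with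
    | nil => simp
    | cons c tg => simp at hlen
  | cons t w ih =>
    cases tg with
    | nil => simp at hlen
    | cons c tg =>
      simp only [List.length_cons, Nat.add_right_cancel_iff] at hlen
      have hnul' : Char.ofNat 0 ∉ tg := fun h => hnul (List.mem_cons_of_mem _ h)
      have hcnul : c ≠ Char.ofNat 0 := fun h => hnul (by simp [h])
      cases hts : t.2.toList with
      | nil =>
        simp only [List.flatMap_cons, List.map_cons, initialOf, initialChar, hts,
          List.nil_append]
        constructor
        · intro h
          have hle := flatMap_len_le w initialOf
            (by intro t; unfold initialOf; rcases t.2.toList with _ | ⟨c0, r⟩ <;> simp)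
          rw [h] at hle
          simp only [List.length_cons] at hle
          omega
        · intro h
          exact absurd (List.cons.injEq .. ▸ h).1 (fun hh => hcnul hh.symm)
      | cons c0 rest =>
        simp only [List.flatMap_cons, List.map_cons, initialOf, initialChar, hts,
          List.cons_append, List.nil_append, List.cons.injEq]
        rw [ih tg hnul' hlen]

theorem prefix_iff_window (tokens : List (String × String)) (tg : List Char) (start : Nat)
    (h : start + tg.length ≤ tokens.length) :
    (tg <+: (bText tokens).drop start ↔
      ((tokens.drop start).take tg.length).map initialChar = tg) := by
  unfold bText
  rw [List.prefix_iff_eq_take, ← List.map_drop, ← List.map_take]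
  exact eq_comm

theorem diff_nil_iff (consumed : List Int) (start m : Nat) :
    (PySem.Set.diff (PySem.Set.ofList (PySem.List.pyRange (start : Int) ((start + m : Nat) : Int) 1)) consumed = []
      ↔ okB consumed start m = false) := by
  simp only [okB, PySem.Set.diff, List.filter_eq_nil_iff, List.any_eq_false,
    Bool.not_eq_true', Bool.not_eq_false]
  constructor
  · intro h j hj
    have := h j ((PySem.Set.mem_ofList _ _).2 hj)
    simpa [PySem.Set.contains] using this
  · intro h x hx
    have := h x ((PySem.Set.mem_ofList _ _).1 hx)
    simpa [PySem.Set.contains] using this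

theorem aLoop_eq_refLoop (target : List Char) (tokens : List (String × String)) (consumed : List Int)
    (hne : target ≠ []) (hnul : Char.ofNat 0 ∉ target) :
    ∀ start, aLoop target tokens consumed start = refLoop target tokens consumed start := by
  have hm : 0 < target.length := List.length_pos_iff.mpr hne
  have key : ∀ k start, tokens.length ≤ start + k →
      aLoop target tokens consumed start = refLoop target tokens consumed start := by
    intro k
    induction k with
    | zero =>
      intro start h
      rw [aLoop, refLoop, dif_neg (by omega), dif_neg (by omega)]
    | succ k ih =>
      intro start h
      rw [aLoop, refLoop]
      by_cases h1 : start + target.length ≤ tokens.length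
      · rw [dif_pos (by omega : start < tokens.length), if_neg (by omega), dif_pos h1]
        simp only []
        by_cases hcons : okB consumed start target.length = true
        · rw [if_neg (fun hd => by rw [diff_nil_iff] at hd; simp [hd] at hcons)]
          have hwlen : ((tokens.drop start).take target.length).length = target.length := by
            simp; omega
          have hinit : (PySem.List.pyRange (start : Int) ((start + target.length : Nat) : Int) 1).flatMap
              (fun j => initialOf (PySem.List.pyGetD tokens j ("", ""))) =
              ((tokens.drop start).take target.length).flatMap initialOf := by
            rw [List.flatMap_def, List.flatMap_def,
              pyRange_map_getD tokens initialOf start target.length h1]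
          have hcond : ((PySem.List.pyRange (start : Int) ((start + target.length : Nat) : Int) 1).flatMap
              (fun j => initialOf (PySem.List.pyGetD tokens j ("", ""))) = target)
              ↔ target.isPrefixOf ((bText tokens).drop start) = true := by
            rw [hinit, List.isPrefixOf_iff_prefix,
              prefix_iff_window tokens target start h1]
            exact window_iff _ _ hnul hwlen
          by_cases hmatch : target.isPrefixOf ((bText tokens).drop start) = true
          · rw [if_pos (hcond.mpr hmatch), if_pos (by rw [hmatch, hcons]; rfl)]
            rw [pyRange_map_getD tokens (fun t => t.1) start target.length h1]
          · rw [if_neg (fun hh => hmatch (hcond.mp hh)), if_neg (by simp [hmatch])]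
            exact ih (start + 1) (by omega)
        · rw [if_pos ((diff_nil_iff _ _ _).2 (by simpa using hcons)),
            if_neg (by simp [hcons])]
          exact ih (start + 1) (by omega)
      · rw [dif_neg h1]
        by_cases hlt : start < tokens.length
        · rw [dif_pos hlt, if_pos (by omega)]
        · rw [dif_neg hlt]
  intro start
  exact key tokens.length start (by omega)

theorem refLoop_step (target : List Char) (tokens : List (String × String)) (consumed : List Int)
    (pos : Nat) (hno : ¬ target <+: (bText tokens).drop pos) :
    refLoop target tokens consumed pos = refLoop target tokens consumed (pos + 1) := by
  rw [refLoop]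
  by_cases h1 : pos + target.length ≤ tokens.length
  · rw [dif_pos h1, if_neg (fun hc => hno (List.isPrefixOf_iff_prefix.mp (Bool.and_eq_true_iff.mp hc).1))]
  · rw [dif_neg h1, refLoop, dif_neg (by omega)]

theorem refLoop_none (target : List Char) (tokens : List (String × String)) (consumed : List Int)
    (pos : Nat) (hnone : ∀ i, pos ≤ i → ¬ target <+: (bText tokens).drop i) :
    refLoop target tokens consumed pos = none := by
  have key : ∀ k pos, tokens.length + 1 ≤ pos + k →
      (∀ i, pos ≤ i → ¬ target <+: (bText tokens).drop i) →
      refLoop target tokens consumed pos = none := by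
    intro k
    induction k with
    | zero =>
      intro pos h hno
      rw [refLoop, dif_neg (by omega)]
    | succ k ih =>
      intro pos h hno
      by_cases h1 : pos + target.length ≤ tokens.length
      · rw [refLoop_step target tokens consumed pos (hno pos le_rfl)]
        exact ih (pos + 1) (by omega) (fun i hi => hno i (by omega))
      · rw [refLoop, dif_neg h1]
  exact key (tokens.length + 1) pos (by omega) hnone

theorem refLoop_skip (target : List Char) (tokens : List (String × String)) (consumed : List Int)
    (a b : Nat) (hab : a ≤ b) (hno : ∀ j, a ≤ j → j < b → ¬ target <+: (bText tokens).drop j) :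
    refLoop target tokens consumed a = refLoop target tokens consumed b := by
  induction b, hab using Nat.le_induction with
  | base => rfl
  | succ b hb ih =>
    rw [ih (fun j hj1 hj2 => hno j hj1 (by omega)),
      refLoop_step target tokens consumed b (hno b hb (by omega))]

theorem bLoop_eq_refLoop (target : List Char) (tokens : List (String × String)) (consumed : List Int)
    (hne : target ≠ []) :
    ∀ fuel pos, pos ≤ tokens.length → tokens.length + 1 ≤ fuel + pos →
      bLoop target (bText tokens) tokens consumed pos fuel = refLoop target tokens consumed pos := by
  have hm : 0 < target.length := List.length_pos_iff.mpr hne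
  intro fuel
  induction fuel with
  | zero => intro pos h1 h2; omega
  | succ fuel ih =>
    intro pos h1 h2
    rw [bLoop]
    simp only []
    have hlen : pos ≤ (bText tokens).length := by rw [length_bText]; exact h1
    by_cases hs : PySem.Chars.findFrom (bText tokens) target (pos : Int) none = -1
    · rw [if_pos hs]
      refine (refLoop_none target tokens consumed pos ?_).symm
      intro i hi hpfx
      have hdd : (bText tokens).drop i = ((bText tokens).drop pos).drop (i - pos) := by
        rw [List.drop_drop]; congr 1; omega
      rw [hdd] at hpfx
      exact (PySem.Chars.findFrom_natCast_eq_neg_one_iff _ _ pos hlen).mp hs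
        (hpfx.isInfix.trans (List.drop_suffix _ _).isInfix)
    · rw [if_neg hs]
      obtain ⟨hge, hpfx, hmin⟩ := PySem.Chars.findFrom_natCast_spec (bText tokens) target pos hlen hs
      have hsn : (PySem.Chars.findFrom (bText tokens) target (pos : Int) none).toNat + target.length ≤ tokens.length := by
        have hl := hpfx.length_le
        rw [List.length_drop, length_bText] at hl
        omega
      have hps : pos ≤ (PySem.Chars.findFrom (bText tokens) target (pos : Int) none).toNat := by omega
      rw [refLoop_skip target tokens consumed pos _ hps (fun j hj1 hj2 => hmin j hj1 hj2)]
      rw [refLoop, dif_pos hsn]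
      have hpre : target.isPrefixOf ((bText tokens).drop (PySem.Chars.findFrom (bText tokens) target (pos : Int) none).toNat) = true :=
        List.isPrefixOf_iff_prefix.mpr hpfx
      rw [← okB]
      by_cases hok : okB consumed (PySem.Chars.findFrom (bText tokens) target (pos : Int) none).toNat target.length = true
      · rw [if_pos hok, if_pos (by rw [hpre, hok]; rfl)]
      · rw [if_neg hok, if_neg (by simp [hok])]
        exact ih _ (by omega) (by omega)

theorem nul_not_mem_target (yields : String) (hdom : pvDomStr yields = true) :
    Char.ofNat 0 ∉ (PySem.Str.lower yields).toList := by
  rw [PySem.Str.toList_lower]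
  unfold PySem.Chars.lower
  intro hmem
  obtain ⟨c, hc, hlc⟩ := List.mem_map.mp hmem
  have hdc : pvDomChar c = true := by
    unfold pvDomStr at hdom
    exact List.all_eq_true.mp hdom c hc
  unfold pvDomChar at hdc
  have hrng : 9 ≤ c.toNat ∧ c.toNat ≤ 126 := by
    simp only [Bool.or_eq_true, Bool.and_eq_true, beq_iff_eq, decide_eq_true_eq] at hdc
    omega
  have h0 : (Char.ofNat 0).toNat = 0 := by decide
  unfold PySem.Chars.lowerChar at hlc
  by_cases hup : PySem.Chars.isupper c = true
  · rw [if_pos hup] at hlc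
    have hval : Nat.isValidChar (c.toNat + 32) := Or.inl (by omega)
    have ht := Char.toNat_ofNat (c.toNat + 32)
    rw [if_pos hval] at ht
    have := congrArg Char.toNat hlc
    rw [ht, h0] at this
    omega
  · rw [if_neg hup] at hlc
    have := congrArg Char.toNat hlc
    rw [h0] at this
    omega

-- ===== VERDICT (by name: the statement is the Claim_ definition above) =====
theorem align_acrostic_py_spec : Claim_equal_align_acrostic_py := by
  intro yields available tokens consumed hdom
  unfold Spec_align_acrostic_py align_acrostic_py align_acrostic_py_alt
  by_cases hy : yields.toList = []
  · simp [hy]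
  · simp only [hy, if_false]
    have hdom' : pvDomStr yields = true := by
      unfold Dom_align_acrostic_py at hdom; simp at hdom; tauto
    have hne : (PySem.Str.lower yields).toList ≠ [] := by
      simp [PySem.Str.toList_lower, PySem.Chars.lower, hy]
    rw [aLoop_eq_refLoop _ _ _ hne (nul_not_mem_target yields hdom'),
        bLoop_eq_refLoop _ _ _ hne _ 0 (by omega) (by omega)]
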